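-- pv_equiv track=rewrite | github.com/wseungjin/codingTest | line/2021/1.py | solution
-- ===== SOURCE A (Python) =====
-- from collections import Counter
--
-- def solution(boxes):
--     answer = 0
--
--     totalList = []
--     for box in boxes:
--         for element in box:
--             totalList.append(element)
--
--     count = Counter(totalList)
--     answerList=list(count.items())
--
--     for element in answerList:
--         if(element[1]%2==1):
--             answer = answer + 1
--
--     return answer//2
-- ===== SOURCE B (Python) =====
-- def solution(boxes):
--     odd = set()
--     for box in boxes:
--         for element in box:
--             if element in odd:
--                 odd.remove(element)
--             else:
--                 odd.add(element)
--     return len(odd) // 2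
-- ===== Notes on version B (the rewrite author's own statement) =====
-- stated objective: idiomatic
-- what changed: Replaces the flatten-into-a-list + Counter + separate odd-frequency counting scan with a single parity-toggling set pass over the elements (add if absent, remove if present), so the set ends up holding exactly the odd-frequency elements and no modulo scan or intermediate list is needed.
import Mathlib
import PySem

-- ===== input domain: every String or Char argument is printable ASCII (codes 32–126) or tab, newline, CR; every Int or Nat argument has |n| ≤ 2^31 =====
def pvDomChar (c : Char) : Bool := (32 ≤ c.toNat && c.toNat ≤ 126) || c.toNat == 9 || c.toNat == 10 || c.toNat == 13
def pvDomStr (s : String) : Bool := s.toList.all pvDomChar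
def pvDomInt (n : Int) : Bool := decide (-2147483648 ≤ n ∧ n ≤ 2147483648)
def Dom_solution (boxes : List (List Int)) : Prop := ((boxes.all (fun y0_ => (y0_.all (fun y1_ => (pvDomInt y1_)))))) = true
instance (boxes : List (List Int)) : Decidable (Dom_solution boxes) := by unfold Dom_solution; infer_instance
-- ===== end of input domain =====

-- B replaces the flatten + Counter + odd-count scan with one parity-toggling set pass (idiomatic, same cost).

-- ===== PORT A =====
def solution (boxes : List (List Int)) : Int :=
  let answer : Int := 0
  let totalList : List Int :=
    boxes.foldl (fun acc box => box.foldl (fun acc element => acc ++ [element]) acc) []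
  let count := PySem.Dict.counter totalList
  let answerList := count.items
  let answer :=
    answerList.foldl (fun answer element =>
      if PySem.Int.mod element.2 2 == 1 then answer + 1 else answer) answer
  PySem.Int.floordiv answer 2

-- ===== PORT B =====
-- odd.remove(element) is executed only under 'element in odd', where remove? returns some.
def solution_alt (boxes : List (List Int)) : Int :=
  let odd : PySem.Set Int :=
    boxes.foldl (fun odd box =>
      box.foldl (fun odd element =>
        if PySem.Set.contains odd element then (PySem.Set.remove? odd element).getD odd
        else PySem.Set.add odd element) odd) PySem.Set.empty
  PySem.Int.floordiv (PySem.Set.len odd) 2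

-- ===== PRECONDITION & SPEC =====
def Spec_solution (boxes : List (List Int)) (out : Int) : Prop := out = solution_alt boxes
instance (boxes : List (List Int)) (out : Int) : Decidable (Spec_solution boxes out) := by unfold Spec_solution; infer_instance

-- ===== CLAIM (what is proved, stated in full; the proofs are below) =====
def Claim_equal_solution : Prop := ∀ (boxes : List (List Int)), Dom_solution boxes → Spec_solution boxes (solution boxes)

-- ===== LEMMAS AND PROOFS =====

-- A's inner append loop builds acc ++ box.
lemma foldl_append_singleton (box : List Int) (acc : List Int) :
    box.foldl (fun acc element => acc ++ [element]) acc = acc ++ box := by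
  induction box generalizing acc with
  | nil => simp
  | cons b bs ih => rw [List.foldl_cons, ih, List.append_assoc]; rfl

-- A's totalList is boxes.flatten.
lemma totalList_eq_flatten (boxes : List (List Int)) :
    boxes.foldl (fun acc box => box.foldl (fun acc element => acc ++ [element]) acc) []
      = boxes.flatten := by
  have h : ∀ (bs : List (List Int)) (acc : List Int),
      bs.foldl (fun acc box => box.foldl (fun acc element => acc ++ [element]) acc) acc
        = acc ++ bs.flatten := by
    intro bs
    induction bs with
    | nil => simp
    | cons b bs ih =>
      intro acc
      rw [List.foldl_cons, foldl_append_singleton, ih, List.flatten_cons, List.append_assoc]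
  simpa using h boxes []

-- counting loop = length of the filtered list
lemma foldl_count_if (p : Int × Int → Bool) (l : List (Int × Int)) (a : Int) :
    l.foldl (fun answer element => if p element then answer + 1 else answer) a
      = a + (l.filter p).length := by
  induction l generalizing a with
  | nil => simp
  | cons x xs ih =>
    simp only [List.foldl_cons, List.filter_cons]
    by_cases h : p x
    · simp only [h, if_pos, List.length_cons, ih]; push_cast; ring
    · simp [h, ih]

-- B's toggle step
def tog (s : List Int) (element : Int) : List Int :=
  if PySem.Set.contains s element then (PySem.Set.remove? s element).getD s
  else PySem.Set.add s element

lemma tog_of_mem {s : List Int} {e : Int} (h : e ∈ s) :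
    tog s e = PySem.Set.discard s e := by
  simp [tog, h, PySem.Set.remove?_of_mem h]

lemma tog_of_not_mem {s : List Int} {e : Int} (h : e ∉ s) : tog s e = s ++ [e] := by
  simp [tog, h]

-- Invariant of the toggle pass: nodup is preserved and membership tracks count parity.
lemma toggle_invariant (L : List Int) (s : List Int) (hs : s.Nodup) :
    (L.foldl tog s).Nodup ∧ ∀ x, x ∈ L.foldl tog s ↔ ((x ∈ s) ↔ L.count x % 2 = 0) := by
  induction L generalizing s with
  | nil =>
    refine ⟨hs, fun x => ?_⟩
    simp
  | cons a L ih =>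
    have hs' : (tog s a).Nodup := by
      by_cases hm : a ∈ s
      · rw [tog_of_mem hm]; exact PySem.Set.nodup_discard s a hs
      · rw [tog_of_not_mem hm]
        simp only [List.nodup_append, List.nodup_singleton, true_and]
        refine ⟨hs, ?_⟩
        intro y hy z hz
        simp only [List.mem_singleton] at hz
        subst hz
        exact fun h => hm (h ▸ hy)
    obtain ⟨hn, hmem⟩ := ih (tog s a) hs'
    refine ⟨hn, fun x => ?_⟩
    rw [List.foldl_cons, hmem x]
    by_cases hxa : x = a
    · subst hxa
      have htog : (x ∈ tog s x) ↔ ¬ (x ∈ s) := by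
        by_cases hm : x ∈ s
        · rw [tog_of_mem hm]; simp [PySem.Set.mem_discard, hm]
        · rw [tog_of_not_mem hm]; simp [hm]
      have hc : (x :: L).count x = L.count x + 1 := by simp
      rw [htog, hc]
      by_cases hxs : x ∈ s <;> simp [hxs] <;> omega
    · have htog : (x ∈ tog s a) ↔ x ∈ s := by
        by_cases hm : a ∈ s
        · rw [tog_of_mem hm, PySem.Set.mem_discard]; simp [hxa]
        · rw [tog_of_not_mem hm]; simp [hxa]
      have hc : (a :: L).count x = L.count x := by
        simp [show ¬ a = x from fun h => hxa h.symm]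
      rw [htog, hc]

-- characterization of A's filtered items: membership = odd count
lemma odd_filter_mem (L : List Int) (x : Int) :
    x ∈ (PySem.Set.ofList L).filter (fun k => PySem.Int.mod ((L.count k : Int)) 2 == 1)
      ↔ L.count x % 2 = 1 := by
  simp only [List.mem_filter, PySem.Set.mem_ofList, beq_iff_eq,
    PySem.Int.mod_eq_emod_of_pos (a := (L.count x : Int)) (b := 2) (by norm_num)]
  constructor
  · rintro ⟨-, h⟩; omega
  · intro h
    have hx : x ∈ L := by rw [← List.count_pos_iff]; omega
    exact ⟨hx, by omega⟩

lemma main_length (L : List Int) :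
    ((PySem.Dict.counter L).items.filter
        (fun element => PySem.Int.mod element.2 2 == 1)).length
      = (L.foldl tog []).length := by
  obtain ⟨hn, hmem⟩ := toggle_invariant L [] (List.nodup_nil)
  have hB : ∀ x, x ∈ L.foldl tog [] ↔ L.count x % 2 = 1 := by
    intro x
    rw [hmem x]
    simp only [List.not_mem_nil, false_iff]
    omega
  rw [PySem.Dict.items_counter, List.filter_map, List.length_map]
  simp only [Function.comp_def]
  have hAset : ((PySem.Set.ofList L).filter
      (fun k => PySem.Int.mod ((L.count k : Int)) 2 == 1)).Nodup :=
    (PySem.Set.nodup_ofList L).filter _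
  apply List.Perm.length_eq
  rw [List.perm_ext_iff_of_nodup hAset hn]
  intro x
  rw [hB x, odd_filter_mem L x]

-- ===== VERDICT (by name: the statement is the Claim_ definition above) =====
theorem solution_spec : Claim_equal_solution := by
  intro boxes _
  unfold Spec_solution solution solution_alt
  simp only [totalList_eq_flatten]
  rw [show (fun (odd : PySem.Set Int) (element : Int) =>
      if PySem.Set.contains odd element then (PySem.Set.remove? odd element).getD odd
      else PySem.Set.add odd element) = tog from rfl]
  rw [← List.foldl_flatten]
  rw [foldl_count_if]
  rw [main_length boxes.flatten]
  simp [PySem.Set.len, PySem.Set.empty]
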